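-- pv_equiv track=rewrite | github.com/hereisjohnny2/TruthTable | Tabelas.py | montarTabela
-- ===== SOURCE A (Python) =====
-- def montarTabela(preps):
--
--     colunas = len(preps)
--
--     if (colunas == 0):
--         tabela = None
--         return tabela
--
--     linhas = int(2 ** colunas)
--     Tabela = {i: [] for i in preps}
--
--     k = 0
--     for prep in Tabela:
--         linha = 0
--         grupo = int(2 ** (colunas - (k+1)))
--         grupoLinha = int(linhas/grupo)
--         for i in range(grupoLinha):
--             j=0
--             while(j < grupo):
--                 if (i%2):
--                     Tabela[prep].append(False)
--                 else:
--                     Tabela[prep].append(True)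
--                 linha += 1
--                 j+=1
--         k += 1
--     return Tabela
-- ===== SOURCE B (Python) =====
-- def montarTabela(preps):
--     if not preps:
--         return None
--     colunas = len(preps)
--     return {p: [(r >> (colunas - 1 - k)) & 1 == 0 for r in range(2 ** colunas)]
--             for k, p in enumerate(dict.fromkeys(preps))}
-- ===== Notes on version B (the rewrite author's own statement) =====
-- stated objective: simpler
-- what changed: Replaces A's dict of empty lists filled by column-major nested block loops (grupo/grupoLinha while loops with a running key index) by a single dict comprehension that computes each cell row-major with one bit test (r >> (colunas-1-k)) & 1 == 0.
import Mathlib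
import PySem

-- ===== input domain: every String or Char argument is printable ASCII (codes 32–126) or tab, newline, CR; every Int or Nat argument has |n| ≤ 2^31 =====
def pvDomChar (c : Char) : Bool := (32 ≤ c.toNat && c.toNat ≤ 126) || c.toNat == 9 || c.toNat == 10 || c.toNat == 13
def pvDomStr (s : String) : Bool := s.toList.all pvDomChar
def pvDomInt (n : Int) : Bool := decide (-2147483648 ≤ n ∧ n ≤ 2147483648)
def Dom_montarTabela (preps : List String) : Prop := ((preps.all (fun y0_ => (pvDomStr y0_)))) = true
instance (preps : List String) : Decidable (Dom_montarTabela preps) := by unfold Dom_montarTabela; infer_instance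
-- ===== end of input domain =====

-- B replaces A's column-major nested block loops over a dict by a row-major bit test per cell (simpler decomposition, same cost).

-- ===== PORT A =====
-- literal port of A: dict of empty columns, then for each key (with running index k)
-- append blocks of size grupo, alternating True/False per block group.
-- `int(linhas/grupo)` is exact power-of-two division, ported as Nat division (exact on these values).
-- loop body of A's `for prep in Tabela` loop, factored out as a named helper
def pvBodyA (colunas : Nat) (d : PySem.Dict String (List Bool)) (kp : Int × String) :
    PySem.Dict String (List Bool) :=
  let k := kp.1.toNat
  let prep := kp.2
  let grupo := 2 ^ (colunas - (k + 1))
  let grupoLinha := (2 ^ colunas) / grupo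
  (List.range grupoLinha).foldl
    (fun d i =>
      (List.range grupo).foldl
        (fun d _ => d.modify prep [] (fun col => col ++ [decide (i % 2 = 0)])) d)
    d

def montarTabela (preps : List String) : Option (List (String × List Bool)) :=
  let colunas := preps.length
  if colunas = 0 then none
  else
    let tabela : PySem.Dict String (List Bool) :=
      preps.foldl (fun d p => d.insert p []) PySem.Dict.empty
    some (((PySem.List.enumerate tabela.keys).foldl (pvBodyA colunas) tabela).items)

-- ===== PORT B =====
-- literal port of B: row-major comprehension over the deduplicated keys, one bit test per cell.
def montarTabela_alt (preps : List String) : Option (List (String × List Bool)) :=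
  if preps = [] then none
  else
    let colunas := preps.length
    some ((PySem.List.enumerate (PySem.List.dedup preps)).map
      (fun kp => (kp.2, (List.range (2 ^ colunas)).map
        (fun r => decide ((r >>> (colunas - 1 - kp.1.toNat)) &&& 1 = 0)))))

-- ===== PRECONDITION & SPEC =====
def Spec_montarTabela (preps : List String) (out : Option (List (String × List Bool))) : Prop := out = montarTabela_alt preps
instance (preps : List String) (out : Option (List (String × List Bool))) : Decidable (Spec_montarTabela preps out) := by unfold Spec_montarTabela; infer_instance

-- ===== CLAIM (what is proved, stated in full; the proofs are below) =====
def Claim_equal_montarTabela : Prop := ∀ (preps : List String), Dom_montarTabela preps → Spec_montarTabela preps (montarTabela preps)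

-- ===== LEMMAS AND PROOFS =====

-- A's column at index k, as the nested block loops produce it
def pvColA (colunas k : Nat) : List Bool :=
  (List.range ((2 ^ colunas) / 2 ^ (colunas - (k + 1)))).flatMap
    (fun i => List.replicate (2 ^ (colunas - (k + 1))) (decide (i % 2 = 0)))

theorem pvBodyA_eq (colunas : Nat) (d : PySem.Dict String (List Bool)) (kp : Int × String) :
    pvBodyA colunas d kp
      = (List.range ((2 ^ colunas) / 2 ^ (colunas - (kp.1.toNat + 1)))).foldl
          (fun d i =>
            (List.range (2 ^ (colunas - (kp.1.toNat + 1)))).foldl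
              (fun d _ => d.modify kp.2 [] (fun col => col ++ [decide (i % 2 = 0)])) d)
          d := rfl

-- keys are untouched by the inner while loop (the key is already present)
theorem pv_keys_innerFold (g : Nat) (prep : String) (b : Bool)
    (d : PySem.Dict String (List Bool)) (h : prep ∈ d.keys) :
    ((List.range g).foldl (fun d _ => d.modify prep [] (fun col => col ++ [b])) d).keys
      = d.keys := by
  induction g with
  | zero => rfl
  | succ n ih =>
    rw [List.range_succ, List.foldl_append, List.foldl_cons, List.foldl_nil,
      PySem.Dict.keys_modify, PySem.Dict.keys_insert_of_contains, ih]
    rw [PySem.Dict.contains_iff_mem_keys, ih]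
    exact h

-- appending the same value `grupo` times
theorem pv_getD_innerFold (g : Nat) (prep : String) (b : Bool)
    (d : PySem.Dict String (List Bool)) : ∀ c,
    ((List.range g).foldl (fun d _ => d.modify prep [] (fun col => col ++ [b])) d).getD c []
      = if c = prep then d.getD c [] ++ List.replicate g b else d.getD c [] := by
  induction g with
  | zero => intro c; split_ifs <;> first | rfl | simp
  | succ n ih =>
    intro c
    rw [List.range_succ, List.foldl_append, List.foldl_cons, List.foldl_nil,
      PySem.Dict.getD_modify, ih prep, if_pos rfl, ih c]
    split_ifs with h
    · subst h; rw [List.replicate_succ', ← List.append_assoc]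
    · rfl

-- the grupoLinha × grupo double loop at one key
theorem pv_keys_outerFold (m g : Nat) (prep : String) (d : PySem.Dict String (List Bool))
    (h : prep ∈ d.keys) :
    ((List.range m).foldl
        (fun d i =>
          (List.range g).foldl
            (fun d _ => d.modify prep [] (fun col => col ++ [decide (i % 2 = 0)])) d)
        d).keys = d.keys := by
  induction m with
  | zero => rfl
  | succ n ih =>
    rw [List.range_succ, List.foldl_append, List.foldl_cons, List.foldl_nil,
      pv_keys_innerFold _ _ _ _ (ih ▸ h), ih]

theorem pv_getD_outerFold (m g : Nat) (prep c : String) (d : PySem.Dict String (List Bool)) :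
    ((List.range m).foldl
        (fun d i =>
          (List.range g).foldl
            (fun d _ => d.modify prep [] (fun col => col ++ [decide (i % 2 = 0)])) d)
        d).getD c []
      = if c = prep then
          d.getD c [] ++ (List.range m).flatMap (fun i => List.replicate g (decide (i % 2 = 0)))
        else d.getD c [] := by
  induction m with
  | zero => split_ifs <;> first | rfl | simp
  | succ n ih =>
    rw [List.range_succ, List.foldl_append, List.foldl_cons, List.foldl_nil,
      pv_getD_innerFold _ _ _ _ c, ih, List.flatMap_append]
    split_ifs with h
    · simp
    · rfl

theorem pv_keys_bodyA (colunas : Nat) (d : PySem.Dict String (List Bool)) (kp : Int × String)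
    (h : kp.2 ∈ d.keys) :
    (pvBodyA colunas d kp).keys = d.keys := by
  rw [pvBodyA_eq, pv_keys_outerFold _ _ _ _ h]

theorem pv_getD_bodyA (colunas : Nat) (d : PySem.Dict String (List Bool)) (kp : Int × String)
    (c : String) :
    (pvBodyA colunas d kp).getD c []
      = if c = kp.2 then d.getD c [] ++ pvColA colunas kp.1.toNat else d.getD c [] := by
  rw [pvBodyA_eq, pv_getD_outerFold, pvColA]

theorem pv_keys_bigFold (colunas : Nat) (es : List (Int × String))
    (d : PySem.Dict String (List Bool)) (h : ∀ e ∈ es, e.2 ∈ d.keys) :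
    (es.foldl (pvBodyA colunas) d).keys = d.keys := by
  induction es generalizing d with
  | nil => rfl
  | cons e es ih =>
    have hb : (pvBodyA colunas d e).keys = d.keys :=
      pv_keys_bodyA colunas d e (h e List.mem_cons_self)
    rw [List.foldl_cons, ih _ (fun e' he' => hb ▸ h e' (List.mem_cons_of_mem _ he')), hb]

theorem pv_getD_bigFold (colunas : Nat) (es : List (Int × String))
    (d : PySem.Dict String (List Bool)) (c : String) :
    (es.foldl (pvBodyA colunas) d).getD c []
      = d.getD c []
        ++ ((es.filter (fun p => p.2 == c)).map (fun p => pvColA colunas p.1.toNat)).flatten := by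
  induction es generalizing d with
  | nil => simp
  | cons e es ih =>
    rw [List.foldl_cons, ih, pv_getD_bodyA, List.filter_cons]
    by_cases h : e.2 = c
    · simp [h]
    · simp [h, Ne.symm h]

theorem pv_filter_enumerate_not_mem (ks : List String) (c : String) (h : c ∉ ks) (s : Int) :
    (PySem.List.enumerate ks s).filter (fun p => p.2 == c) = [] := by
  induction ks generalizing s with
  | nil => rfl
  | cons k ks ih =>
    rw [PySem.List.enumerate_cons]
    simp only [List.filter_cons]
    have hk : ¬ (k = c) := fun e => h (e ▸ List.mem_cons_self)
    simp only [beq_iff_eq, hk]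
    exact ih (fun hm => h (List.mem_cons_of_mem _ hm)) (s + 1)

theorem pv_filter_enumerate_nodup (ks : List String) (hnd : ks.Nodup) (s : Int) (j : Nat)
    (hj : j < ks.length) :
    (PySem.List.enumerate ks s).filter (fun p => p.2 == ks[j]) = [(s + j, ks[j])] := by
  induction ks generalizing s j with
  | nil => exact absurd hj (by simp)
  | cons k ks ih =>
    rw [PySem.List.enumerate_cons]
    simp only [List.filter_cons]
    rcases List.nodup_cons.mp hnd with ⟨hk, hnd'⟩
    cases j with
    | zero =>
      simp only [List.getElem_cons_zero, beq_self_eq_true, if_pos]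
      rw [pv_filter_enumerate_not_mem ks k hk (s + 1)]
      simp
    | succ j =>
      have hj' : j < ks.length := by simpa using hj
      have hk' : ¬ (k = ks[j]) := fun e => hk (e ▸ List.getElem_mem hj')
      simp only [List.getElem_cons_succ, beq_iff_eq, hk']
      rw [ih hnd' (s + 1) j hj']
      have hsj : s + 1 + (j : Int) = s + ((j : Nat) + 1 : Nat) := by push_cast; ring
      rw [hsj]
      simp

-- value of any key in the initial all-empty dict
theorem pv_getD_initFold (l : List String) (d : PySem.Dict String (List Bool))
    (hd : ∀ c, d.getD c [] = []) (c : String) :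
    (l.foldl (fun d p => d.insert p []) d).getD c [] = [] := by
  induction l generalizing d with
  | nil => exact hd c
  | cons p l ih =>
    simp only [List.foldl_cons]
    exact ih (d.insert p []) (fun c => by rw [PySem.Dict.getD_insert]; split_ifs <;> simp [hd])

-- block structure of the range: each quotient class of size g is one constant block
theorem pv_block_map (g : Nat) (hg : 0 < g) (h : Nat → Bool) :
    ∀ m, (List.range (m * g)).map (fun r => h (r / g))
      = (List.range m).flatMap (fun i => List.replicate g (h i)) := by
  intro m
  induction m with
  | zero => simp
  | succ n ih =>
    rw [Nat.succ_mul, List.range_add, List.map_append, ih, List.range_succ, List.flatMap_append]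
    congr 1
    simp only [List.flatMap_cons, List.flatMap_nil, List.append_nil]
    apply List.ext_getElem
    · simp
    · intro i h1 h2
      have hig : i < g := by simpa using h1
      simp only [List.getElem_map, List.getElem_range, List.getElem_replicate]
      congr 1
      calc (n * g + i) / g = (g * n + i) / g := by rw [Nat.mul_comm]
        _ = n + i / g := Nat.mul_add_div hg n i
        _ = n := by rw [Nat.div_eq_of_lt hig, Nat.add_zero]

-- A's column equals B's column
theorem pv_col_eq (colunas k : Nat) (hk : k < colunas) :
    pvColA colunas k
      = (List.range (2 ^ colunas)).map (fun r => decide ((r >>> (colunas - 1 - k)) &&& 1 = 0)) := by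
  unfold pvColA
  have hs : colunas - (k + 1) = colunas - 1 - k := by omega
  have hdiv : (2 ^ colunas) / 2 ^ (colunas - (k + 1)) = 2 ^ (k + 1) := by
    rw [Nat.pow_div (by omega) (by norm_num)]
    congr 1
    omega
  have hmul : 2 ^ colunas = 2 ^ (k + 1) * 2 ^ (colunas - (k + 1)) := by
    rw [← pow_add]
    congr 1
    omega
  rw [hdiv]
  have hbm := pv_block_map (2 ^ (colunas - (k + 1))) (Nat.pow_pos (by norm_num))
    (fun i => decide (i % 2 = 0)) (2 ^ (k + 1))
  rw [← hmul] at hbm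
  rw [← hbm]
  apply List.map_congr_left
  intro r _
  rw [Nat.shiftRight_eq_div_pow, Nat.and_one_is_mod, hs]

-- ===== VERDICT (by name: the statement is the Claim_ definition above) =====
theorem montarTabela_spec : Claim_equal_montarTabela := by
  intro preps _
  show montarTabela preps = montarTabela_alt preps
  unfold montarTabela montarTabela_alt
  by_cases hnil : preps = []
  · simp [hnil]
  · have hlen : ¬ preps.length = 0 := by simpa [List.length_eq_zero_iff] using hnil
    simp only [hlen, hnil, if_false]
    congr 1
    have hkeys : (preps.foldl (fun d p => d.insert p [])
        (PySem.Dict.empty : PySem.Dict String (List Bool))).keys = PySem.List.dedup preps := by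
      rw [PySem.Dict.keys_foldl_insert, PySem.Dict.keys_empty, PySem.Set.update_nil_left,
        PySem.List.dedup_eq_ofList]
    have hnd : (PySem.List.dedup preps).Nodup := PySem.List.nodup_dedup preps
    rw [hkeys]
    have hRkeys : ((PySem.List.enumerate (PySem.List.dedup preps)).foldl
          (pvBodyA preps.length)
          (preps.foldl (fun d p => d.insert p []) PySem.Dict.empty)).keys
        = PySem.List.dedup preps := by
      rw [pv_keys_bigFold _ _ _ (by
        intro e he
        rw [hkeys]
        rcases (PySem.List.mem_enumerate_iff _ _ _).mp he with ⟨k, hk, rfl⟩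
        exact List.getElem_mem hk), hkeys]
    rw [PySem.Dict.items_eq_map_keys _ (by rw [hRkeys]; exact hnd) [], hRkeys]
    apply List.ext_getElem
    · simp
    · intro j h1 h2
      have hjk : j < (PySem.List.dedup preps).length := by simpa using h1
      simp only [List.getElem_map, PySem.List.getElem_enumerate]
      rw [pv_getD_bigFold, pv_filter_enumerate_nodup _ hnd 0 j hjk]
      rw [pv_getD_initFold preps PySem.Dict.empty (fun c => PySem.Dict.getD_empty ..)]
      simp only [List.map_cons, List.map_nil, List.flatten_cons, List.flatten_nil,
        List.nil_append, List.append_nil]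
      have hjcol : j < preps.length := by
        have hle : (PySem.List.dedup preps).length ≤ preps.length := by
          rw [PySem.List.dedup_eq_ofList]
          exact PySem.Set.length_ofList_le preps
        omega
      have htn : ((0 : Int) + (j : Int)).toNat = j := by omega
      rw [htn, pv_col_eq preps.length j hjcol]
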